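-- pv_equiv track=rewrite | github.com/kbyky/markdownusm | markdownusm/parser.py | _divide_list_by_prefix
-- ===== SOURCE A (Python) =====
-- def _divide_list_by_prefix(target: list[str], prefix: str) -> list[list[str]]:
--     """Split a list into multiple lists wrapped as a list
--
--     Examples:
--         >>> _divide_list_by_prefix(["Story1", "---", "Story2"], "---")
--         [["Story1"], ["Story2"]]
--
--         >>> _divide_list_by_prefix(["---", "Story2"], "---")
--         [[], ["Story2"]]
--
--     """
--     result: list[list[str]] = []
--     child: list[str] = []
--
--     for item in target:
--         if item.startswith(prefix):
--             result.append(child)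
--             child = []
--         else:
--             child.append(item)
--     result.append(child)
--
--     return result
-- ===== SOURCE B (Python) =====
-- def _divide_list_by_prefix(target: list[str], prefix: str) -> list[list[str]]:
--     bounds = [i for i, x in enumerate(target) if x.startswith(prefix)]
--     result = []
--     start = 0
--     for b in bounds:
--         result.append(target[start:b])
--         start = b + 1
--     result.append(target[start:])
--     return result
-- ===== Notes on version B (the rewrite author's own statement) =====
-- stated objective: alternative
-- what changed: B first collects the boundary indices (positions whose item starts with the prefix) and then builds the parts by slicing target between consecutive boundaries, instead of A's single pass that accumulates items into a running child buffer.
import Mathlib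
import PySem

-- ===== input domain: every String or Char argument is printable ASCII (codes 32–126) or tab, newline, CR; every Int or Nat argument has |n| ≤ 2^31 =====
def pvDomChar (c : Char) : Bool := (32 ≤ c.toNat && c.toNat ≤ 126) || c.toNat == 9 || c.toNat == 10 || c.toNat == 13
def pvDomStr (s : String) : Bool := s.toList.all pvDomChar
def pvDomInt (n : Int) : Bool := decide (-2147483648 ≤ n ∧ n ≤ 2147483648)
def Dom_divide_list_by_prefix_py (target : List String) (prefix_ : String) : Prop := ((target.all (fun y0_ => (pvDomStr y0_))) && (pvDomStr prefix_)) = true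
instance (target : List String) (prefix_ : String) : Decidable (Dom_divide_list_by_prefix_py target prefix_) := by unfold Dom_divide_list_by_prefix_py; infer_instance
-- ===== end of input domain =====

-- B splits by collecting the boundary indices first and slicing between them, instead of
-- A's running child buffer; objective: alternative decomposition (same O(n) cost).

-- ===== PORT A =====
-- A's loop: state (result, child); delimiter flushes child, otherwise append item to child.
def divide_list_by_prefix_py (target : List String) (prefix_ : String) : List (List String) :=
  let st := target.foldl
    (fun (st : List (List String) × List String) item =>
      if PySem.Str.startswith item prefix_ then (st.1 ++ [st.2], ([] : List String))
      else (st.1, st.2 ++ [item]))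
    (([] : List (List String)), ([] : List String))
  st.1 ++ [st.2]

-- ===== PORT B =====
-- Source B: bounds = [i for i, x in enumerate(target) if x.startswith(prefix)]
def pvBounds (target : List String) (prefix_ : String) : List Int :=
  ((PySem.List.enumerate target 0).filter (fun p => PySem.Str.startswith p.2 prefix_)).map (fun p => p.1)

-- Source B: loop appending target[start:b] and finally target[start:]
def divide_list_by_prefix_py_alt (target : List String) (prefix_ : String) : List (List String) :=
  let st := (pvBounds target prefix_).foldl
    (fun (st : List (List String) × Int) b =>
      (st.1 ++ [PySem.List.slice target (some st.2) (some b)], b + 1))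
    (([] : List (List String)), (0 : Int))
  st.1 ++ [PySem.List.slice target (some st.2) none]

-- ===== PRECONDITION & SPEC =====
def Spec_divide_list_by_prefix_py (target : List String) (prefix_ : String) (out : List (List String)) : Prop := out = divide_list_by_prefix_py_alt target prefix_
instance (target : List String) (prefix_ : String) (out : List (List String)) : Decidable (Spec_divide_list_by_prefix_py target prefix_ out) := by unfold Spec_divide_list_by_prefix_py; infer_instance

-- ===== CLAIM (what is proved, stated in full; the proofs are below) =====
def Claim_equal_divide_list_by_prefix_py : Prop := ∀ (target : List String) (prefix_ : String), Dom_divide_list_by_prefix_py target prefix_ → Spec_divide_list_by_prefix_py target prefix_ (divide_list_by_prefix_py target prefix_)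

-- ===== LEMMAS AND PROOFS =====

-- reference recursive splitter both ports are reduced to
def pvSrec (prefix_ : String) : List String → List (List String)
  | [] => [[]]
  | x :: xs =>
    if PySem.Str.startswith x prefix_ then [] :: pvSrec prefix_ xs
    else (pvSrec prefix_ xs).modifyHead (x :: ·)

lemma pvModify_modify {α : Type} (l : List α) (f g : α → α) :
    (l.modifyHead g).modifyHead f = l.modifyHead (f ∘ g) := by
  cases l <;> simp

lemma pvA_fold (prefix_ : String) (xs : List String)
    (res : List (List String)) (child : List String) :
    (let st := xs.foldl
      (fun (st : List (List String) × List String) item =>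
        if PySem.Str.startswith item prefix_ then (st.1 ++ [st.2], ([] : List String))
        else (st.1, st.2 ++ [item])) (res, child)
     st.1 ++ [st.2]) = res ++ (pvSrec prefix_ xs).modifyHead (child ++ ·) := by
  induction xs generalizing res child with
  | nil => simp [pvSrec]
  | cons x xs ih =>
    simp only [List.foldl_cons, pvSrec]
    by_cases h : PySem.Str.startswith x prefix_ = true
    · simp only [h, if_pos]
      rw [ih]
      cases hs : pvSrec prefix_ xs <;> simp
    · simp only [h, if_neg, Bool.false_eq_true, not_false_iff]
      rw [ih, pvModify_modify]
      have hf : (fun t => child ++ [x] ++ t) = ((fun t : List String => child ++ t) ∘ fun t => x :: t) := by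
        funext t; simp
      rw [hf]

lemma pvA_eq_srec (target : List String) (prefix_ : String) :
    divide_list_by_prefix_py target prefix_ = pvSrec prefix_ target := by
  unfold divide_list_by_prefix_py
  rw [pvA_fold]
  cases hs : pvSrec prefix_ target <;> simp

-- B-side: generalized bounds (enumerate starting at s)
def pvBoundsAt (target : List String) (prefix_ : String) (s : Int) : List Int :=
  ((PySem.List.enumerate target s).filter (fun p => PySem.Str.startswith p.2 prefix_)).map (fun p => p.1)

-- recursive form of B's slicing loop
def pvRunB (t : List String) : List Int → Int → List (List String)
  | [], s => [PySem.List.slice t (some s) none]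
  | b :: bs, s => PySem.List.slice t (some s) (some b) :: pvRunB t bs (b + 1)

lemma pvB_fold (t : List String) (bs : List Int) (res : List (List String)) (s : Int) :
    (let st := bs.foldl
      (fun (st : List (List String) × Int) b =>
        (st.1 ++ [PySem.List.slice t (some st.2) (some b)], b + 1)) (res, s)
     st.1 ++ [PySem.List.slice t (some st.2) none]) = res ++ pvRunB t bs s := by
  induction bs generalizing res s with
  | nil => simp [pvRunB]
  | cons b bs ih => simp [pvRunB, ih]

lemma pvEnumerate_shift {α : Type} (xs : List α) (s : Int) :
    PySem.List.enumerate xs (s + 1) = (PySem.List.enumerate xs s).map (fun p => (p.1 + 1, p.2)) := by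
  induction xs generalizing s with
  | nil => simp [PySem.List.enumerate_nil]
  | cons x xs ih => simp [PySem.List.enumerate_cons, ih]

lemma pvBoundsAt_cons (x : String) (xs : List String) (prefix_ : String) (s : Int) :
    pvBoundsAt (x :: xs) prefix_ s =
      if PySem.Str.startswith x prefix_ then s :: pvBoundsAt xs prefix_ (s + 1)
      else pvBoundsAt xs prefix_ (s + 1) := by
  unfold pvBoundsAt
  rw [PySem.List.enumerate_cons, List.filter_cons]
  by_cases h : PySem.Str.startswith x prefix_ = true
  · rw [if_pos h, if_pos h, List.map_cons]
  · rw [if_neg h, if_neg h]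

lemma pvBoundsAt_shift (xs : List String) (prefix_ : String) (s : Int) :
    pvBoundsAt xs prefix_ (s + 1) = (pvBoundsAt xs prefix_ s).map (· + 1) := by
  unfold pvBoundsAt
  rw [pvEnumerate_shift, List.filter_map, List.map_map]
  simp [Function.comp_def]

lemma pvBoundsAt_nonneg (xs : List String) (prefix_ : String) (s : Int) (hs : 0 ≤ s) :
    ∀ b ∈ pvBoundsAt xs prefix_ s, 0 ≤ b := by
  intro b hb
  unfold pvBoundsAt at hb
  simp only [List.mem_map, List.mem_filter] at hb
  obtain ⟨p, ⟨hp, _⟩, rfl⟩ := hb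
  rcases (PySem.List.mem_enumerate_iff _ _ _).1 hp with ⟨k, hk, rfl⟩
  simp; omega

lemma pvRunB_shift (x : String) (t : List String) (bs : List Int) (s : Int)
    (hs : 0 ≤ s) (hbs : ∀ b ∈ bs, 0 ≤ b) :
    pvRunB (x :: t) (bs.map (· + 1)) (s + 1) = pvRunB t bs s := by
  induction bs generalizing s with
  | nil =>
    simp only [List.map_nil, pvRunB]
    rw [PySem.List.slice_from _ (by omega : (0:Int) ≤ s + 1),
        PySem.List.slice_from _ hs]
    have h1 : (s + 1).toNat = s.toNat + 1 := by omega
    rw [h1]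
    simp
  | cons b bs ih =>
    have hb : 0 ≤ b := hbs b (by simp)
    simp only [List.map_cons, pvRunB]
    have e1 : PySem.List.slice (x :: t) (some (s + 1)) (some (b + 1)) =
        PySem.List.slice t (some s) (some b) := by
      rw [PySem.List.slice_toNat (ha := by omega) (hb := by omega),
          PySem.List.slice_toNat (ha := hs) (hb := hb)]
      have h1 : (s + 1).toNat = s.toNat + 1 := by omega
      have h2 : (b + 1).toNat = b.toNat + 1 := by omega
      rw [h1, h2]
      simp
    rw [e1, ih (b + 1) (by omega) (fun c hc => hbs c (List.mem_cons_of_mem _ hc))]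

lemma pvRunB_eq_srec (t : List String) (prefix_ : String) :
    pvRunB t (pvBoundsAt t prefix_ 0) 0 = pvSrec prefix_ t := by
  induction t with
  | nil =>
    simp [pvBoundsAt, PySem.List.enumerate_nil, pvRunB, pvSrec,
      PySem.List.slice_from _ (le_refl (0 : Int))]
  | cons x t ih =>
    rw [pvBoundsAt_cons]
    have hshift := pvBoundsAt_shift t prefix_ 0
    have hnn := pvBoundsAt_nonneg t prefix_ 0 (le_refl 0)
    by_cases h : PySem.Str.startswith x prefix_ = true
    · have h2 : PySem.Chars.startswith x.toList prefix_.toList = true := by simpa using h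
      rw [if_pos h, hshift]
      simp only [pvRunB]
      rw [pvRunB_shift x t _ 0 (le_refl 0) hnn, ih,
          PySem.List.slice_toNat (ha := le_refl 0) (hb := le_refl 0)]
      simp [pvSrec, h2]
    · have h2 : PySem.Chars.startswith x.toList prefix_.toList = false := by simpa using h
      rw [if_neg h, hshift]
      cases hB : pvBoundsAt t prefix_ 0 with
      | nil =>
        simp only [List.map_nil, pvRunB]
        rw [PySem.List.slice_from _ (le_refl (0 : Int))]
        have ht : pvSrec prefix_ t = [t] := by
          rw [← ih, hB]
          simp [pvRunB, PySem.List.slice_from _ (le_refl (0 : Int))]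
        simp [pvSrec, h2, ht]
      | cons b bs =>
        have hb : 0 ≤ b := hnn b (by rw [hB]; simp)
        have hbs : ∀ c ∈ bs, 0 ≤ c := fun c hc => hnn c (by rw [hB]; simp [hc])
        simp only [List.map_cons, pvRunB]
        have e1 : PySem.List.slice (x :: t) (some 0) (some (b + 1)) =
            x :: PySem.List.slice t (some 0) (some b) := by
          rw [PySem.List.slice_toNat (ha := le_refl 0) (hb := by omega),
              PySem.List.slice_toNat (ha := le_refl 0) (hb := hb)]
          have h2 : (b + 1).toNat = b.toNat + 1 := by omega
          rw [h2]
          simp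
        rw [e1, pvRunB_shift x t bs (b + 1) (by omega) hbs]
        have ht : pvSrec prefix_ t =
            PySem.List.slice t (some 0) (some b) :: pvRunB t bs (b + 1) := by
          rw [← ih, hB]; rfl
        simp [pvSrec, h2, ht]

lemma pvB_eq_srec (target : List String) (prefix_ : String) :
    divide_list_by_prefix_py_alt target prefix_ = pvSrec prefix_ target := by
  unfold divide_list_by_prefix_py_alt
  have : pvBounds target prefix_ = pvBoundsAt target prefix_ 0 := rfl
  rw [this, pvB_fold]
  simp [pvRunB_eq_srec]

-- ===== VERDICT (by name: the statement is the Claim_ definition above) =====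
theorem divide_list_by_prefix_py_spec : Claim_equal_divide_list_by_prefix_py := by
  intro target prefix_ _
  unfold Spec_divide_list_by_prefix_py
  rw [pvA_eq_srec, pvB_eq_srec]
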